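-- pv_equiv track=rewrite | github.com/Wronker99/Tutto_Boardgame | Projekt_1.py | punkte_pruefen
-- ===== SOURCE A (Python) =====
-- import collections
--
-- def punkte_pruefen(wurf):
--     punkte = 0
--     korrekte_Auswahl = True
--     haeufigkeiten = collections.Counter(wurf)
--     for wert, anzahl in list(haeufigkeiten.items()):
--         while anzahl >= 3:
--             if wert == 1:
--                 punkte += 1000
--             else:
--                 punkte += wert * 100
--             anzahl -= 3
--             haeufigkeiten[wert] -= 3
--     for wert, anzahl in list(haeufigkeiten.items()):
--         if wert == 1:
--             punkte += anzahl * 100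
--         elif wert == 5:
--             punkte += anzahl * 50
--         elif anzahl > 1:
--             korrekte_Auswahl = False
--     return punkte, korrekte_Auswahl
-- ===== SOURCE B (Python) =====
-- import collections
--
-- def punkte_pruefen(wurf):
--     # Single pass over the counts: triples via divmod instead of the
--     # mutating while-loop, remainder scored with the same branch logic.
--     punkte = 0
--     korrekte_Auswahl = True
--     for wert, anzahl in collections.Counter(wurf).items():
--         triples, rest = divmod(anzahl, 3)
--         punkte += triples * (1000 if wert == 1 else wert * 100)
--         if wert == 1:
--             punkte += rest * 100
--         elif wert == 5:
--             punkte += rest * 50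
--         elif rest > 1:
--             korrekte_Auswahl = False
--     return punkte, korrekte_Auswahl
-- ===== Notes on version B (the rewrite author's own statement) =====
-- stated objective: simpler
-- what changed: A's two passes over the Counter (a while-loop that repeatedly subtracts 3 and mutates the dict, then a second pass over the leftover counts) become one non-mutating pass using divmod(anzahl, 3) for the triples and the remainder.
import Mathlib
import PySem

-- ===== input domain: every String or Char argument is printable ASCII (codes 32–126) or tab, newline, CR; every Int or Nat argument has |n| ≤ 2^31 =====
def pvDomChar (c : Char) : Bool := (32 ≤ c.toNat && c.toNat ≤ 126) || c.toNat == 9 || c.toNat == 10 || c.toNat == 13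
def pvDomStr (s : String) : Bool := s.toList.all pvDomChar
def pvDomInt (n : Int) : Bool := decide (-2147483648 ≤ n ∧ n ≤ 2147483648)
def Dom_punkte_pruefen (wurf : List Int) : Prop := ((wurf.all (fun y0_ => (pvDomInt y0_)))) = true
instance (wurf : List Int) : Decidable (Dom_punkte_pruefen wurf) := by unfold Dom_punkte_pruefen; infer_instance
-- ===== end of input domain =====

-- B replaces A's two passes (a mutating while-loop over the Counter, then a second items pass)
-- by one pass over the Counter using divmod(anzahl, 3); objective: simpler.

-- ===== PORT A =====
-- inner 'while anzahl >= 3:' loop of A's first pass (also decrements the dict entry)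
def pvWhileA (wert anzahl punkte : Int) (d : PySem.Dict Int Int) : Int × PySem.Dict Int Int :=
  if _h : 3 ≤ anzahl then
    pvWhileA wert (anzahl - 3) (punkte + (if wert == 1 then 1000 else wert * 100))
      (d.modify wert 0 (· - 3))
  else (punkte, d)
termination_by anzahl.toNat
decreasing_by omega

def punkte_pruefen (wurf : List Int) : Int × Bool :=
  let haeufigkeiten := PySem.Dict.counter wurf
  let s1 := haeufigkeiten.items.foldl (fun s pr => pvWhileA pr.1 pr.2 s.1 s.2) (0, haeufigkeiten)
  s1.2.items.foldl (fun (s : Int × Bool) pr =>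
      if pr.1 == 1 then (s.1 + pr.2 * 100, s.2)
      else if pr.1 == 5 then (s.1 + pr.2 * 50, s.2)
      else if pr.2 > 1 then (s.1, false)
      else s) (s1.1, true)

-- ===== PORT B =====
def punkte_pruefen_alt (wurf : List Int) : Int × Bool :=
  (PySem.Dict.counter wurf).items.foldl (fun (s : Int × Bool) pr =>
      let triples := PySem.Int.floordiv pr.2 3
      let rest := PySem.Int.mod pr.2 3
      let p := s.1 + triples * (if pr.1 == 1 then 1000 else pr.1 * 100)
      if pr.1 == 1 then (p + rest * 100, s.2)
      else if pr.1 == 5 then (p + rest * 50, s.2)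
      else if rest > 1 then (p, false)
      else (p, s.2)) (0, true)

-- ===== PRECONDITION & SPEC =====
def Spec_punkte_pruefen (wurf : List Int) (out : Int × Bool) : Prop := out = punkte_pruefen_alt wurf
instance (wurf : List Int) (out : Int × Bool) : Decidable (Spec_punkte_pruefen wurf out) := by unfold Spec_punkte_pruefen; infer_instance

-- ===== CLAIM (what is proved, stated in full; the proofs are below) =====
def Claim_equal_punkte_pruefen : Prop := ∀ (wurf : List Int), Dom_punkte_pruefen wurf → Spec_punkte_pruefen wurf (punkte_pruefen wurf)

-- ===== LEMMAS AND PROOFS =====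

-- the while-loop adds (anzahl // 3) triples' worth of points and reduces the entry by 3·(anzahl // 3)
theorem pvWhileA_spec : ∀ (n : Nat) (wert anzahl p : Int) (d : PySem.Dict Int Int),
    anzahl.toNat ≤ n → 0 ≤ anzahl →
    pvWhileA wert anzahl p d =
      (p + PySem.Int.floordiv anzahl 3 * (if wert == 1 then 1000 else wert * 100),
       if 3 ≤ anzahl then d.insert wert (d.getD wert 0 - 3 * PySem.Int.floordiv anzahl 3) else d) := by
  intro n
  induction n with
  | zero =>
    intro wert anzahl p d hle h0
    have ha : anzahl = 0 := by omega
    subst ha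
    rw [pvWhileA]
    simp [PySem.Int.floordiv]
  | succ n ih =>
    intro wert anzahl p d hle h0
    by_cases h3 : 3 ≤ anzahl
    · rw [pvWhileA]
      simp only [h3, dif_pos]
      rw [ih wert (anzahl - 3) _ _ (by omega) (by omega)]
      have hfd : PySem.Int.floordiv (anzahl - 3) 3 = PySem.Int.floordiv anzahl 3 - 1 := by
        rw [PySem.Int.floordiv_eq_ediv_of_pos (by norm_num), PySem.Int.floordiv_eq_ediv_of_pos (by norm_num)]
        omega
      have hmod : PySem.Dict.modify d wert 0 (· - 3) = d.insert wert (d.getD wert 0 - 3) := rfl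
      by_cases h6 : 3 ≤ anzahl - 3
      · simp only [h6, if_pos, hfd, hmod]
        rw [PySem.Dict.getD_insert_self, PySem.Dict.insert_insert_self]
        rw [Prod.mk.injEq]
        refine ⟨by ring, ?_⟩
        have hv : d.getD wert 0 - 3 - 3 * (PySem.Int.floordiv anzahl 3 - 1)
            = d.getD wert 0 - 3 * PySem.Int.floordiv anzahl 3 := by ring
        rw [hv]
      · simp only [h6, if_neg, hfd, hmod, not_false_iff]
        have : PySem.Int.floordiv anzahl 3 = 1 := by
          rw [PySem.Int.floordiv_eq_ediv_of_pos (by norm_num)]; omega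
        rw [this, Prod.mk.injEq]
        exact ⟨by ring, by norm_num⟩
    · rw [pvWhileA]
      simp only [h3, dif_neg, not_false_iff]
      have : PySem.Int.floordiv anzahl 3 = 0 := by
        rw [PySem.Int.floordiv_eq_ediv_of_pos (by norm_num)]; omega
      rw [this]; norm_num

-- inserting at a key of a dict with distinct keys rewrites that entry in place
theorem pv_insert_mid (pre rest : List (Int × Int)) (k c v : Int)
    (hnd : ((pre ++ (k, c) :: rest).map Prod.fst).Nodup) :
    (PySem.Dict.mk (pre ++ (k, c) :: rest)).insert k v = PySem.Dict.mk (pre ++ (k, v) :: rest) := by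
  rw [List.map_append, List.map_cons, List.nodup_append] at hnd
  obtain ⟨hpre, hcons, hdisj⟩ := hnd
  have hkpre : ∀ q ∈ pre, q.1 ≠ k := by
    intro q hq hqk
    exact hdisj q.1 (List.mem_map_of_mem hq) k (by simp) hqk
  have hkrest : ∀ q ∈ rest, q.1 ≠ k := by
    intro q hq hqk
    rw [List.nodup_cons] at hcons
    apply hcons.1
    exact List.mem_map.mpr ⟨q, hq, hqk⟩
  have hcont : (PySem.Dict.mk (pre ++ (k, c) :: rest)).contains k = true := by
    rw [PySem.Dict.contains_eq_decide_mem_keys]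
    simp [PySem.Dict.keys]
  unfold PySem.Dict.insert
  rw [if_pos hcont]
  simp only [List.map_append, List.map_cons]
  rw [List.map_congr_left (fun q hq => if_neg (by simp [hkpre q hq])),
    List.map_congr_left (fun q hq => if_neg (by simp [hkrest q hq]))]
  simp

-- A's first pass over the snapshot: points = Σ (c//3)·bonus, every count becomes c % 3 in place
theorem pv_loop1_spec : ∀ (xs pre : List (Int × Int)) (p : Int),
    ((pre ++ xs).map Prod.fst).Nodup → (∀ pr ∈ xs, 0 ≤ pr.2) →
    xs.foldl (fun s pr => pvWhileA pr.1 pr.2 s.1 s.2) (p, PySem.Dict.mk (pre ++ xs))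
      = (p + (xs.map (fun pr => PySem.Int.floordiv pr.2 3 * (if pr.1 == 1 then 1000 else pr.1 * 100))).sum,
         PySem.Dict.mk (pre ++ xs.map (fun pr => (pr.1, PySem.Int.mod pr.2 3)))) := by
  intro xs
  induction xs with
  | nil => intro pre p _ _; simp
  | cons pr rest ih =>
    intro pre p hnd hpos
    obtain ⟨k, c⟩ := pr
    have hc : (0:Int) ≤ c := hpos (k, c) (List.mem_cons_self)
    rw [List.foldl_cons]
    rw [pvWhileA_spec c.toNat k c p _ (le_refl _) hc]
    have hgetD : (PySem.Dict.mk (pre ++ (k, c) :: rest)).getD k 0 = c := by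
      apply PySem.Dict.getD_of_mem_items
      · simp
      · simpa [PySem.Dict.keys] using hnd
    have hmodc : c - 3 * PySem.Int.floordiv c 3 = PySem.Int.mod c 3 := by
      have := PySem.Int.floordiv_mul_add_mod c 3
      omega
    by_cases h3 : 3 ≤ c
    · rw [if_pos h3, hgetD, hmodc, pv_insert_mid pre rest k c _ hnd]
      have hnd' : (((pre ++ [(k, PySem.Int.mod c 3)]) ++ rest).map Prod.fst).Nodup := by
        simpa using hnd
      have := ih (pre ++ [(k, PySem.Int.mod c 3)])
        (p + PySem.Int.floordiv c 3 * (if k == 1 then 1000 else k * 100)) hnd'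
        (fun q hq => hpos q (List.mem_cons_of_mem _ hq))
      rw [List.append_assoc, List.singleton_append] at this
      rw [this]
      simp [add_assoc]
    · rw [if_neg h3]
      have hnd' : (((pre ++ [(k, c)]) ++ rest).map Prod.fst).Nodup := by simpa using hnd
      have := ih (pre ++ [(k, c)])
        (p + PySem.Int.floordiv c 3 * (if k == 1 then 1000 else k * 100)) hnd'
        (fun q hq => hpos q (List.mem_cons_of_mem _ hq))
      rw [List.append_assoc, List.singleton_append] at this
      rw [this]
      simp [add_assoc]
      omega

def pvScore2 (pr : Int × Int) : Int :=
  if pr.1 == 1 then pr.2 * 100 else if pr.1 == 5 then pr.2 * 50 else 0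

def pvBad2 (pr : Int × Int) : Bool := !(pr.1 == 1) && !(pr.1 == 5) && decide (pr.2 > 1)

-- A's second pass in closed form
theorem pv_loop2_spec : ∀ (L : List (Int × Int)) (p : Int) (b : Bool),
    L.foldl (fun (s : Int × Bool) pr =>
        if pr.1 == 1 then (s.1 + pr.2 * 100, s.2)
        else if pr.1 == 5 then (s.1 + pr.2 * 50, s.2)
        else if pr.2 > 1 then (s.1, false)
        else s) (p, b)
      = (p + (L.map pvScore2).sum, b && !(L.any pvBad2)) := by
  intro L
  induction L with
  | nil => intro p b; simp
  | cons pr rest ih =>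
    intro p b
    rw [List.foldl_cons, List.map_cons, List.sum_cons, List.any_cons]
    by_cases h1 : pr.1 == 1
    · simp only [h1, if_pos, ih, pvScore2, pvBad2]
      simp [add_assoc, h1]
    · by_cases h5 : pr.1 == 5
      · simp only [h1, h5, if_pos, if_neg, Bool.not_eq_true, ih, pvScore2, pvBad2]
        simp [add_assoc, h1, h5]
      · by_cases hg : pr.2 > 1
        · simp only [h1, h5, hg, if_pos, if_neg, Bool.not_eq_true, ih, pvScore2, pvBad2]
          simp [h1, h5, hg]
        · simp only [h1, h5, hg, if_neg, Bool.not_eq_true, ih, pvScore2, pvBad2]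
          simp [h1, h5, hg]

def pvScoreB (pr : Int × Int) : Int :=
  PySem.Int.floordiv pr.2 3 * (if pr.1 == 1 then 1000 else pr.1 * 100) +
    (if pr.1 == 1 then PySem.Int.mod pr.2 3 * 100
     else if pr.1 == 5 then PySem.Int.mod pr.2 3 * 50 else 0)

def pvBadB (pr : Int × Int) : Bool :=
  !(pr.1 == 1) && !(pr.1 == 5) && decide (PySem.Int.mod pr.2 3 > 1)

-- B's single pass in closed form
theorem pv_loopB_spec : ∀ (L : List (Int × Int)) (p : Int) (b : Bool),
    L.foldl (fun (s : Int × Bool) pr =>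
        let triples := PySem.Int.floordiv pr.2 3
        let rest := PySem.Int.mod pr.2 3
        let q := s.1 + triples * (if pr.1 == 1 then 1000 else pr.1 * 100)
        if pr.1 == 1 then (q + rest * 100, s.2)
        else if pr.1 == 5 then (q + rest * 50, s.2)
        else if rest > 1 then (q, false)
        else (q, s.2)) (p, b)
      = (p + (L.map pvScoreB).sum, b && !(L.any pvBadB)) := by
  intro L
  induction L with
  | nil => intro p b; simp
  | cons pr rest ih =>
    intro p b
    rw [List.foldl_cons, List.map_cons, List.sum_cons, List.any_cons]
    simp only
    by_cases h1 : pr.1 == 1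
    · simp only [h1, if_pos, ih, pvScoreB, pvBadB]
      simp [h1]; ring
    · by_cases h5 : pr.1 == 5
      · simp only [h1, h5, if_pos, if_neg, Bool.not_eq_true, ih, pvScoreB, pvBadB]
        simp [h1, h5]; ring
      · by_cases hg : PySem.Int.mod pr.2 3 > 1
        · simp only [h1, h5, hg, if_pos, if_neg, Bool.not_eq_true, ih, pvScoreB, pvBadB]
          simp [h1, h5, hg]; ring
        · simp only [h1, h5, hg, if_neg, Bool.not_eq_true, ih, pvScoreB, pvBadB]
          simp [h1, h5, hg]; ring

-- ===== VERDICT (by name: the statement is the Claim_ definition above) =====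
theorem punkte_pruefen_spec : Claim_equal_punkte_pruefen := by
  intro wurf _
  unfold Spec_punkte_pruefen punkte_pruefen punkte_pruefen_alt
  simp only
  have hnd : (([] ++ (PySem.Dict.counter wurf).items).map Prod.fst).Nodup := by
    simpa [PySem.Dict.keys] using PySem.Dict.nodup_keys_counter (xs := wurf)
  have hpos : ∀ pr ∈ (PySem.Dict.counter wurf).items, (0:Int) ≤ pr.2 := by
    intro pr hpr
    rw [PySem.Dict.items_counter] at hpr
    obtain ⟨k, _, rfl⟩ := List.mem_map.mp hpr
    positivity
  have h1 := pv_loop1_spec ((PySem.Dict.counter wurf).items) [] 0 hnd hpos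
  rw [List.nil_append, List.nil_append] at h1
  have hmk : PySem.Dict.mk (PySem.Dict.counter wurf).items = PySem.Dict.counter wurf := rfl
  rw [hmk] at h1
  rw [h1]
  simp only [PySem.Dict.items]
  rw [pv_loop2_spec, pv_loopB_spec]
  rw [List.map_map, List.any_map]
  rw [Prod.mk.injEq]
  constructor
  · rw [zero_add, zero_add, ← List.sum_map_add]
    apply congrArg
    apply List.map_congr_left
    intro pr _
    simp [Function.comp, pvScore2, pvScoreB]
  · apply congrArg
    apply congrArg
    apply PySem.List.any_congr_mem
    intro pr _
    simp [Function.comp, pvBad2, pvBadB]
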